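-- pv_equiv track=rewrite | github.com/nikita-548/FindHotelBot | handlers/handlers/load_data_api.py | generator_page_size
-- ===== SOURCE A (Python) =====
-- from typing import Iterable, Optional
--
-- def generator_page_size(number_of_page, number_of_hotels) -> Iterable:
--     """
--     Генератор размера страниц.
--
--     Args:
--         :param number_of_page: (int) количество страиц
--         :param number_of_hotels: (int) общее количество отелей
--         :return: Iterable
--     """
--     for page in range(number_of_page):
--         page_size = 0
--         for hotel in range(number_of_hotels):
--             page_size += 1
--             if page_size == 25:
--                 break
--         number_of_hotels -= 25
--         yield page_size
-- ===== SOURCE B (Python) =====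
-- def generator_page_size(number_of_page, number_of_hotels):
--     for i in range(number_of_page):
--         yield max(0, min(25, number_of_hotels - 25 * i))
-- ===== Notes on version B (the rewrite author's own statement) =====
-- stated objective: simpler
-- what changed: Replaced the inner counting loop and the mutable running decrement of number_of_hotels with a per-page closed-form clamp max(0, min(25, number_of_hotels - 25*i)).
import Mathlib
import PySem

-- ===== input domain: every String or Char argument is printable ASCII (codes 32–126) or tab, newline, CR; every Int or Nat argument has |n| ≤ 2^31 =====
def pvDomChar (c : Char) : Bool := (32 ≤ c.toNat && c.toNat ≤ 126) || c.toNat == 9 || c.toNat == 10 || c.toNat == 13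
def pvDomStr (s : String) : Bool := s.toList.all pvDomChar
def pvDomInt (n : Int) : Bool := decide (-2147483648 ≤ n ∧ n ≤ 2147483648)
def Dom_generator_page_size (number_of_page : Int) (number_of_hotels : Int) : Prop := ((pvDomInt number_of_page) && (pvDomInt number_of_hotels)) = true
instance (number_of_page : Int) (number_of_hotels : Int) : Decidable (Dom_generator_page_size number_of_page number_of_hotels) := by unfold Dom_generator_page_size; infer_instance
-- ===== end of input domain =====

-- B replaces A's inner counting loop and mutable decrement with a per-page closed-form clamp (simpler).


-- ===== PORT A =====
-- inner 'for hotel in range(number_of_hotels): page_size += 1; if page_size == 25: break'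
-- (range iteration transliterated as counter recursion so the break is an early exit, as in Python)
def pvInnerA (n hotel page_size : Int) : Int :=
  if hotel < n then
    if page_size + 1 = 25 then page_size + 1 else pvInnerA n (hotel + 1) (page_size + 1)
  else page_size
termination_by (n - hotel).toNat
decreasing_by omega

-- outer 'for page in range(number_of_page)' with the running 'number_of_hotels -= 25'
def pvOuterA (p page number_of_hotels : Int) : List Int :=
  if page < p then
    pvInnerA number_of_hotels 0 0 :: pvOuterA p (page + 1) (number_of_hotels - 25)
  else []
termination_by (p - page).toNat
decreasing_by omega

def generator_page_size (number_of_page : Int) (number_of_hotels : Int) : List Int :=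
  pvOuterA number_of_page 0 number_of_hotels

-- ===== PORT B =====
def generator_page_size_alt (number_of_page : Int) (number_of_hotels : Int) : List Int :=
  (PySem.List.pyRange 0 number_of_page 1).map (fun i => max 0 (min 25 (number_of_hotels - 25 * i)))

-- ===== PRECONDITION & SPEC =====
def Spec_generator_page_size (number_of_page : Int) (number_of_hotels : Int) (out : List Int) : Prop := out = generator_page_size_alt number_of_page number_of_hotels
instance (number_of_page : Int) (number_of_hotels : Int) (out : List Int) : Decidable (Spec_generator_page_size number_of_page number_of_hotels out) := by unfold Spec_generator_page_size; infer_instance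

-- ===== CLAIM (what is proved, stated in full; the proofs are below) =====
def Claim_equal_generator_page_size : Prop := ∀ (number_of_page : Int) (number_of_hotels : Int), Dom_generator_page_size number_of_page number_of_hotels → Spec_generator_page_size number_of_page number_of_hotels (generator_page_size number_of_page number_of_hotels)

-- ===== LEMMAS AND PROOFS =====

-- invariant of the inner counting loop
theorem pvInnerA_range (n k ps : Int) (h0 : 0 ≤ ps) (h : ps < 25) :
    pvInnerA n k ps = min 25 (ps + max 0 (n - k)) := by
  unfold pvInnerA
  split_ifs with hk h25
  · omega
  · have := pvInnerA_range n (k + 1) (ps + 1) (by omega) (by omega)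
    rw [this]; omega
  · omega
termination_by (n - k).toNat
decreasing_by omega

theorem pvOuterA_eq (p k n : Int) :
    pvOuterA p k n
      = (PySem.List.pyRange k p 1).map (fun i => max 0 (min 25 (n + 25 * k - 25 * i))) := by
  unfold pvOuterA
  split_ifs with hk
  · rw [PySem.List.pyRange_one_cons hk]
    simp only [List.map_cons]
    have hhead : pvInnerA n 0 0 = max 0 (min 25 (n + 25 * k - 25 * k)) := by
      rw [pvInnerA_range n 0 0 (by omega) (by omega)]; omega
    have harg : ∀ i : Int, n - 25 + 25 * (k + 1) - 25 * i = n + 25 * k - 25 * i := by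
      intro i; ring
    rw [hhead, pvOuterA_eq p (k + 1) (n - 25)]
    simp only [harg]
  · have hnil : PySem.List.pyRange k p 1 = [] := by
      rw [PySem.List.pyRange_one]
      have : (p - k).toNat = 0 := by omega
      simp [this]
    rw [hnil, List.map_nil]
termination_by (p - k).toNat
decreasing_by omega

-- ===== VERDICT (by name: the statement is the Claim_ definition above) =====
theorem generator_page_size_spec : Claim_equal_generator_page_size := by
  intro p n _
  unfold Spec_generator_page_size generator_page_size generator_page_size_alt
  rw [pvOuterA_eq p 0 n]
  simp
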